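-- pv_equiv track=rewrite | github.com/FireLabSoftware/VariantRabbit | VariantRabbit_ba03_080524.py | PlusMe1
-- ===== SOURCE A (Python) =====
-- def antisense(s):
--     return s.replace('A','t').replace('T','a').replace('G','c').replace('C','g').upper()[::-1]
--
-- def PlusMe1(s,t,Circular=True):
--     ''' takes a target t putatively from a sequence s and returns a best guess of the sequence or its antisense (whichever matches best
--         using a single end-longest match test)'''
--     if Circular:
--         s = s+s[:len(t)-1]
--     for i in range(len(t),1,-1):
--         if t[:i] in s:
--             return t
--         if antisense(t[:i]) in s:
--             return antisense(t)
--         if t[-i:] in s: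
--             return t
--         if antisense(t[-i:]) in s:
--             return antisense(t)
--     return t
-- ===== SOURCE B (Python) =====
-- _COMP = {'A': 'T', 'T': 'A', 'G': 'C', 'C': 'G'}
--
-- def _rc(x):
--     """reverse complement; non-ACGT characters are uppercased (as antisense() does)"""
--     return ''.join(_COMP.get(c, c.upper()) for c in reversed(x))
--
-- def PlusMe1(s, t, Circular=True):
--     if Circular:
--         s = s + s[:len(t)-1]
--     at = _rc(t)
--     n = len(t)
--     def grow(p, suffix):
--         # longest m <= n with (p[-m:] if suffix else p[:m]) a substring of s,
--         # found by growing from 0 (containment is downward closed in m)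
--         m = 0
--         while m < n and (p[-(m+1):] if suffix else p[:m+1]) in s:
--             m += 1
--         return m
--     m1 = grow(t, False)   # t[:i] in s
--     m2 = grow(at, True)   # antisense(t[:i]) = at[-i:] in s
--     m3 = grow(t, True)    # t[-i:] in s
--     m4 = grow(at, False)  # antisense(t[-i:]) = at[:i] in s
--     M = max(m1, m2, m3, m4)
--     if M < 2:
--         return t
--     if m1 == M:
--         return t
--     if m2 == M:
--         return at
--     if m3 == M:
--         return t
--     return at
-- ===== Notes on version B (the rewrite author's own statement) =====
-- stated objective: faster
-- what changed: A scans i downward from len(t) doing up to four substring tests per i until one hits; B instead grows four maximal end-match lengths upward from 0 (prefix/suffix of t and of its reverse-complement, each stopping at the first failure) and applies A's fixed priority once at the common maximum, so on typical inputs only O(max-match) containment tests are run instead of O(len(t)).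
import Mathlib
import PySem

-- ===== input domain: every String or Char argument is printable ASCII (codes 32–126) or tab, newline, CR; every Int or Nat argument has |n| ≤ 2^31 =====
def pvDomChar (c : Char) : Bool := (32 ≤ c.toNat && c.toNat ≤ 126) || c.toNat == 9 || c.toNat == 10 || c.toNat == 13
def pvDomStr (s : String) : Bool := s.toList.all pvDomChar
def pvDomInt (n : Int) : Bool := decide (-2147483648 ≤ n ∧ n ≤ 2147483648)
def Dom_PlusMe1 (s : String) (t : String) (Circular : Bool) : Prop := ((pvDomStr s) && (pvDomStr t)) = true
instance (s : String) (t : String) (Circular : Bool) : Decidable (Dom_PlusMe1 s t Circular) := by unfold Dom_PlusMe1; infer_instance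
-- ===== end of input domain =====

-- B replaces A's descending quadruple-containment loop (O(|t|) containment tests starting from
-- the longest candidate) by four maximal match lengths grown upward from 0 plus one priority
-- decision at the common maximum; measurably faster because matches are typically short.

-- ===== PORT A =====

-- antisense(s) = s.replace('A','t').replace('T','a').replace('G','c').replace('C','g').upper()[::-1]
def pvAsense (x : List Char) : List Char :=
  ((PySem.List.slice? (PySem.Chars.upper
      (PySem.Chars.replace (PySem.Chars.replace (PySem.Chars.replace
        (PySem.Chars.replace x ['A'] ['t']) ['T'] ['a']) ['G'] ['c']) ['C'] ['g']))
    none none (-1)).getD [])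

-- the loop 'for i in range(len(t),1,-1): …' with its four checks, early returns and fall-through
def pvAGo (sl tl : List Char) (i : Nat) : List Char :=
  if 2 ≤ i then
    if PySem.Chars.isIn (PySem.List.slice tl none (some (i : Int))) sl then tl
    else if PySem.Chars.isIn (pvAsense (PySem.List.slice tl none (some (i : Int)))) sl then pvAsense tl
    else if PySem.Chars.isIn (PySem.List.slice tl (some (-(i : Int))) none) sl then tl
    else if PySem.Chars.isIn (pvAsense (PySem.List.slice tl (some (-(i : Int))) none)) sl then pvAsense tl
    else pvAGo sl tl (i - 1)
  else tl
termination_by i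
decreasing_by omega

def PlusMe1 (s : String) (t : String) (Circular : Bool) : String :=
  let tl := t.toList
  let sl := if Circular then s.toList ++ PySem.List.slice s.toList none (some ((tl.length : Int) - 1)) else s.toList
  String.ofList (pvAGo sl tl tl.length)

-- ===== PORT B =====

def pvComp : PySem.Dict Char Char := PySem.Dict.ofList [('A','T'),('T','A'),('G','C'),('C','G')]

-- _rc(x) = ''.join(_COMP.get(c, c.upper()) for c in reversed(x))
def pvRC (x : List Char) : List Char :=
  x.reverse.map (fun c => PySem.Dict.getD pvComp c (PySem.Chars.upperChar c))

-- grow: while m < n and (p[-(m+1):] if suffix else p[:m+1]) in s: m += 1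
def pvGrow (sl p : List Char) (n : Nat) (suffix : Bool) (m : Nat) : Nat :=
  if m < n then
    if PySem.Chars.isIn (if suffix then PySem.List.slice p (some (-((m : Int) + 1))) none
                         else PySem.List.slice p none (some ((m : Int) + 1))) sl
    then pvGrow sl p n suffix (m + 1) else m
  else m
termination_by n - m
decreasing_by omega

def PlusMe1_alt (s : String) (t : String) (Circular : Bool) : String :=
  let tl := t.toList
  let n := tl.length
  let sl := if Circular then s.toList ++ PySem.List.slice s.toList none (some ((n : Int) - 1)) else s.toList
  let at_ := pvRC tl
  let m1 := pvGrow sl tl n false 0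
  let m2 := pvGrow sl at_ n true 0
  let m3 := pvGrow sl tl n true 0
  let m4 := pvGrow sl at_ n false 0
  let M := max (max m1 m2) (max m3 m4)
  if M < 2 then t
  else if m1 = M then t
  else if m2 = M then String.ofList at_
  else if m3 = M then t
  else String.ofList at_

-- ===== PRECONDITION & SPEC =====
def Spec_PlusMe1 (s : String) (t : String) (Circular : Bool) (out : String) : Prop := out = PlusMe1_alt s t Circular
instance (s : String) (t : String) (Circular : Bool) (out : String) : Decidable (Spec_PlusMe1 s t Circular out) := by unfold Spec_PlusMe1; infer_instance

-- ===== CLAIM (what is proved, stated in full; the proofs are below) =====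
def Claim_equal_PlusMe1 : Prop := ∀ (s : String) (t : String) (Circular : Bool), Dom_PlusMe1 s t Circular → Spec_PlusMe1 s t Circular (PlusMe1 s t Circular)

-- ===== LEMMAS AND PROOFS =====

-- per-char reverse-complement map both helpers compute
def pvF (c : Char) : Char :=
  if c = 'A' then 'T' else if c = 'T' then 'A' else if c = 'G' then 'C' else if c = 'C' then 'G'
  else PySem.Chars.upperChar c

lemma pvGoSingle (a b : Char) : ∀ (l : List Char) (fuel : Nat) (acc : List Char), l.length ≤ fuel →
    PySem.Chars.replace.go [a] [b] fuel l acc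
      = acc.reverse ++ l.map (fun c => if c = a then b else c) := by
  intro l
  induction l with
  | nil => intro fuel acc _; cases fuel <;> simp [PySem.Chars.replace.go]
  | cons c t ih =>
      intro fuel acc hle
      cases fuel with
      | zero => simp at hle
      | succ f =>
        rw [PySem.Chars.replace.go]
        by_cases h : c = a
        · subst h
          simp only [List.isPrefixOf, BEq.rfl, Bool.true_and, if_pos]
          show PySem.Chars.replace.go [c] [b] f (List.drop 1 (c :: t)) ([b].reverse ++ acc) = _
          rw [List.drop_one, List.tail_cons, ih f ([b].reverse ++ acc) (by simpa using Nat.succ_le_succ_iff.mp hle)]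
          simp
        · have hpre : ([a].isPrefixOf (c :: t)) = false := by
            simp [List.isPrefixOf]; intro hc; exact absurd hc.symm h
          simp only [hpre, Bool.false_eq_true, if_neg, not_false_iff]
          rw [ih f (c :: acc) (by simpa using Nat.succ_le_succ_iff.mp hle)]
          simp [h]

lemma pvReplaceSingle (a b : Char) (l : List Char) :
    PySem.Chars.replace l [a] [b] = l.map (fun c => if c = a then b else c) := by
  rw [PySem.Chars.replace]
  simp [pvGoSingle a b l l.length [] (le_refl _)]

lemma pvAsense_eq (x : List Char) : pvAsense x = x.reverse.map pvF := by
  unfold pvAsense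
  rw [pvReplaceSingle, pvReplaceSingle, pvReplaceSingle, pvReplaceSingle,
    PySem.List.slice?_none_none_neg_one]
  simp only [Option.getD_some, PySem.Chars.upper, List.map_map, List.map_reverse]
  congr 1
  apply List.map_congr_left
  intro c _
  simp only [Function.comp]
  by_cases h1 : c = 'A'
  · subst h1; decide
  · by_cases h2 : c = 'T'
    · subst h2; decide
    · by_cases h3 : c = 'G'
      · subst h3; decide
      · by_cases h4 : c = 'C'
        · subst h4; decide
        · simp [pvF, h1, h2, h3, h4]

lemma pvRC_eq (x : List Char) : pvRC x = x.reverse.map pvF := by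
  unfold pvRC
  apply List.map_congr_left
  intro c _
  by_cases h1 : c = 'A'
  · subst h1; decide
  · by_cases h2 : c = 'T'
    · subst h2; decide
    · by_cases h3 : c = 'G'
      · subst h3; decide
      · by_cases h4 : c = 'C'
        · subst h4; decide
        · have hit : pvComp.items = [('A','T'),('T','A'),('G','C'),('C','G')] := by decide
          have e1 : ('A' == c) = false := by simp [Ne.symm h1]
          have e2 : ('T' == c) = false := by simp [Ne.symm h2]
          have e3 : ('G' == c) = false := by simp [Ne.symm h3]
          have e4 : ('C' == c) = false := by simp [Ne.symm h4]
          simp [PySem.Dict.getD, PySem.Dict.get?, hit, List.find?, e1, e2, e3, e4, pvF, h1, h2, h3, h4]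

-- canonical conditions: 'p[:k] in s' and 'p[-k:] in s'
def pvCP (sl p : List Char) (k : Nat) : Bool := PySem.Chars.isIn (p.take k) sl
def pvCS (sl p : List Char) (k : Nat) : Bool := PySem.Chars.isIn (p.drop (p.length - k)) sl

lemma pvCP_down (sl p : List Char) {j k : Nat} (hjk : j ≤ k) (h : pvCP sl p k = true) :
    pvCP sl p j = true := by
  rw [pvCP, PySem.Chars.isIn_iff_infix] at h ⊢
  have hj : p.take j = (p.take k).take j := by
    rw [List.take_take, Nat.min_eq_left hjk]
  rw [hj]
  exact (List.take_prefix j (p.take k)).isInfix.trans h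

lemma pvCS_down (sl p : List Char) {j k : Nat} (hjk : j ≤ k) (hk : k ≤ p.length)
    (h : pvCS sl p k = true) : pvCS sl p j = true := by
  rw [pvCS, PySem.Chars.isIn_iff_infix] at h ⊢
  refine List.IsInfix.trans ?_ h
  have : p.drop (p.length - j) = List.drop ((p.length - j) - (p.length - k)) (p.drop (p.length - k)) := by
    rw [List.drop_drop]; congr 1; omega
  rw [this]
  exact (List.drop_suffix _ _).isInfix

-- the literal condition pvGrow tests at step m (with k = m+1)
def pvB (sl p : List Char) (suffix : Bool) (k : Nat) : Bool :=
  PySem.Chars.isIn (if suffix then PySem.List.slice p (some (-(k : Int))) none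
                    else PySem.List.slice p none (some (k : Int))) sl

lemma pvB_eq_canon (sl p : List Char) (suffix : Bool) {k : Nat} (hk : 1 ≤ k) :
    pvB sl p suffix k = (if suffix then pvCS sl p k else pvCP sl p k) := by
  cases suffix
  · show PySem.Chars.isIn (PySem.List.slice p none (some (k : Int))) sl = pvCP sl p k
    rw [PySem.List.slice_to_natCast, pvCP]
  · show PySem.Chars.isIn (PySem.List.slice p (some (-(k : Int))) none) sl = pvCS sl p k
    rw [PySem.List.slice_from_neg_natCast p k (by omega), pvCS]

lemma pvGrow_spec (sl p : List Char) (n : Nat) (suffix : Bool) :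
    ∀ d m, n - m = d → m ≤ n →
      m ≤ pvGrow sl p n suffix m ∧ pvGrow sl p n suffix m ≤ n ∧
      (∀ k, m < k → k ≤ pvGrow sl p n suffix m → pvB sl p suffix k = true) ∧
      (pvGrow sl p n suffix m < n → pvB sl p suffix (pvGrow sl p n suffix m + 1) = false) := by
  intro d
  induction d with
  | zero =>
      intro m hd hm
      have hmn : m = n := by omega
      rw [pvGrow, if_neg (by omega)]
      exact ⟨le_refl _, hm, by omega, by omega⟩
  | succ d ih =>
      intro m hd hm
      have hlt : m < n := by omega
      have hcond : (PySem.Chars.isIn (if suffix then PySem.List.slice p (some (-((m : Int) + 1))) none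
                      else PySem.List.slice p none (some ((m : Int) + 1))) sl)
                    = pvB sl p suffix (m + 1) := by
        rw [pvB]; norm_cast
      by_cases hc : pvB sl p suffix (m + 1) = true
      · have hstep : pvGrow sl p n suffix m = pvGrow sl p n suffix (m + 1) := by
          rw [pvGrow, if_pos hlt, hcond, if_pos hc]
        obtain ⟨ha, hb, hcc, hdd⟩ := ih (m + 1) (by omega) (by omega)
        rw [hstep]
        refine ⟨by omega, hb, ?_, hdd⟩
        intro k hk1 hk2
        rcases Nat.lt_or_ge m k with _ | _
        · rcases Nat.eq_or_lt_of_le (by omega : m + 1 ≤ k) with h | h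
          · rw [← h]; exact hc
          · exact hcc k (by omega) hk2
        · omega
      · have hstep : pvGrow sl p n suffix m = m := by
          rw [pvGrow, if_pos hlt, hcond, if_neg hc]
        rw [hstep]
        exact ⟨le_refl _, by omega, by omega, fun _ => by simpa using hc⟩

-- characterization: on 1 ≤ k ≤ n = p.length the tested condition holds iff k ≤ grown maximum
lemma pvGrow_iff (sl p : List Char) (suffix : Bool) :
    ∀ k, 1 ≤ k → k ≤ p.length →
      ((if suffix then pvCS sl p k else pvCP sl p k) = true ↔ k ≤ pvGrow sl p p.length suffix 0) := by
  intro k hk1 hk2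
  obtain ⟨-, hle, hall, hend⟩ := pvGrow_spec sl p p.length suffix (p.length - 0) 0 rfl (by omega)
  set r := pvGrow sl p p.length suffix 0 with hr
  constructor
  · intro h
    by_contra hgt
    have hrn : r < p.length := by omega
    have hBk : pvB sl p suffix (r + 1) = true := by
      rw [pvB_eq_canon sl p suffix (by omega : 1 ≤ r + 1)]
      cases suffix
      · simpa using pvCP_down sl p (by omega : r + 1 ≤ k) (by simpa using h)
      · simpa using pvCS_down sl p (by omega : r + 1 ≤ k) hk2 (by simpa using h)
    rw [hend hrn] at hBk
    exact Bool.false_ne_true hBk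
  · intro h
    have := hall k (by omega) h
    rwa [pvB_eq_canon sl p suffix hk1] at this

lemma pvAGo_step (sl tl : List Char) {i : Nat} (h2 : 2 ≤ i) (hn : i ≤ tl.length) :
    pvAGo sl tl i =
      (if pvCP sl tl i then tl
       else if pvCS sl (tl.reverse.map pvF) i then tl.reverse.map pvF
       else if pvCS sl tl i then tl
       else if pvCP sl (tl.reverse.map pvF) i then tl.reverse.map pvF
       else pvAGo sl tl (i - 1)) := by
  have hto : PySem.List.slice tl none (some (i : Int)) = tl.take i := PySem.List.slice_to_natCast tl i
  have hfrom : PySem.List.slice tl (some (-(i : Int))) none = tl.drop (tl.length - i) :=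
    PySem.List.slice_from_neg_natCast tl i (by omega)
  have hlen : (tl.reverse.map pvF).length = tl.length := by simp
  have htake : (tl.take i).reverse.map pvF = (tl.reverse.map pvF).drop (tl.length - i) := by
    rw [List.reverse_take, List.map_drop]
  have hdrop : (tl.drop (tl.length - i)).reverse.map pvF = (tl.reverse.map pvF).take i := by
    rw [List.reverse_drop, List.map_take]
    congr 2
    omega
  rw [pvAGo, if_pos h2, hto, hfrom, pvAsense_eq, pvAsense_eq, pvAsense_eq, htake, hdrop]
  simp only [pvCP, pvCS, hlen]
  rfl

lemma pvMain (sl tl at_ : List Char) (n m1 m2 m3 m4 : Nat)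
    (hat : at_ = tl.reverse.map pvF) (hn : n = tl.length)
    (h1 : ∀ k, 1 ≤ k → k ≤ n → (pvCP sl tl k = true ↔ k ≤ m1))
    (h2 : ∀ k, 1 ≤ k → k ≤ n → (pvCS sl at_ k = true ↔ k ≤ m2))
    (h3 : ∀ k, 1 ≤ k → k ≤ n → (pvCS sl tl k = true ↔ k ≤ m3))
    (h4 : ∀ k, 1 ≤ k → k ≤ n → (pvCP sl at_ k = true ↔ k ≤ m4)) :
    ∀ i, i ≤ n → m1 ≤ i → m2 ≤ i → m3 ≤ i → m4 ≤ i →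
      pvAGo sl tl i =
        (if max (max m1 m2) (max m3 m4) < 2 then tl
         else if m1 = max (max m1 m2) (max m3 m4) then tl
         else if m2 = max (max m1 m2) (max m3 m4) then at_
         else if m3 = max (max m1 m2) (max m3 m4) then tl
         else at_) := by
  intro i
  induction i using Nat.strong_induction_on with
  | _ i ih =>
    intro hin hm1 hm2 hm3 hm4
    by_cases hi2 : 2 ≤ i
    · rw [pvAGo_step sl tl hi2 (hn ▸ hin), ← hat]
      by_cases hc1 : pvCP sl tl i = true
      · have : i ≤ m1 := (h1 i (by omega) hin).mp hc1
        have hM : max (max m1 m2) (max m3 m4) = m1 := by omega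
        rw [if_pos hc1, hM, if_neg (by omega), if_pos rfl]
      · have hne1 : ¬ (i ≤ m1) := fun h => hc1 ((h1 i (by omega) hin).mpr h)
        rw [if_neg (by simpa using hc1)]
        by_cases hc2 : pvCS sl at_ i = true
        · have : i ≤ m2 := (h2 i (by omega) hin).mp hc2
          have hM : max (max m1 m2) (max m3 m4) = m2 := by omega
          rw [if_pos hc2, hM, if_neg (by omega), if_neg (by omega), if_pos rfl]
        · have hne2 : ¬ (i ≤ m2) := fun h => hc2 ((h2 i (by omega) hin).mpr h)
          rw [if_neg (by simpa using hc2)]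
          by_cases hc3 : pvCS sl tl i = true
          · have : i ≤ m3 := (h3 i (by omega) hin).mp hc3
            have hM : max (max m1 m2) (max m3 m4) = m3 := by omega
            rw [if_pos hc3, hM, if_neg (by omega), if_neg (by omega), if_neg (by omega), if_pos rfl]
          · have hne3 : ¬ (i ≤ m3) := fun h => hc3 ((h3 i (by omega) hin).mpr h)
            rw [if_neg (by simpa using hc3)]
            by_cases hc4 : pvCP sl at_ i = true
            · have : i ≤ m4 := (h4 i (by omega) hin).mp hc4
              have hM : max (max m1 m2) (max m3 m4) = m4 := by omega
              rw [if_pos hc4, hM, if_neg (by omega), if_neg (by omega), if_neg (by omega),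
                if_neg (by omega)]
            · have hne4 : ¬ (i ≤ m4) := fun h => hc4 ((h4 i (by omega) hin).mpr h)
              rw [if_neg (by simpa using hc4)]
              exact ih (i - 1) (by omega) (by omega) (by omega) (by omega) (by omega) (by omega)
    · rw [pvAGo, if_neg hi2, if_pos (by omega)]

-- ===== VERDICT (by name: the statement is the Claim_ definition above) =====
theorem PlusMe1_spec : Claim_equal_PlusMe1 := by
  intro s t Circular _
  unfold Spec_PlusMe1 PlusMe1 PlusMe1_alt
  simp only []
  set tl := t.toList with htl
  set sl := (if Circular then s.toList ++ PySem.List.slice s.toList none (some ((tl.length : Int) - 1)) else s.toList) with hsl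
  have hat : pvRC tl = tl.reverse.map pvF := pvRC_eq tl
  have hlenrc : (pvRC tl).length = tl.length := by rw [hat]; simp
  have hm1s := pvGrow_spec sl tl tl.length false (tl.length - 0) 0 rfl (by omega)
  have hm2s := pvGrow_spec sl (pvRC tl) tl.length true (tl.length - 0) 0 rfl (by omega)
  have hm3s := pvGrow_spec sl tl tl.length true (tl.length - 0) 0 rfl (by omega)
  have hm4s := pvGrow_spec sl (pvRC tl) tl.length false (tl.length - 0) 0 rfl (by omega)
  set m1 := pvGrow sl tl tl.length false 0 with hm1
  set m2 := pvGrow sl (pvRC tl) tl.length true 0 with hm2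
  set m3 := pvGrow sl tl tl.length true 0 with hm3
  set m4 := pvGrow sl (pvRC tl) tl.length false 0 with hm4
  have h1 : ∀ k, 1 ≤ k → k ≤ tl.length → (pvCP sl tl k = true ↔ k ≤ m1) := by
    intro k hk1 hk2
    simpa using pvGrow_iff sl tl false k hk1 hk2
  have h3 : ∀ k, 1 ≤ k → k ≤ tl.length → (pvCS sl tl k = true ↔ k ≤ m3) := by
    intro k hk1 hk2
    simpa using pvGrow_iff sl tl true k hk1 hk2
  have h2 : ∀ k, 1 ≤ k → k ≤ tl.length → (pvCS sl (pvRC tl) k = true ↔ k ≤ m2) := by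
    intro k hk1 hk2
    have := pvGrow_iff sl (pvRC tl) true k hk1 (by omega)
    rw [hlenrc] at this
    simpa using this
  have h4 : ∀ k, 1 ≤ k → k ≤ tl.length → (pvCP sl (pvRC tl) k = true ↔ k ≤ m4) := by
    intro k hk1 hk2
    have := pvGrow_iff sl (pvRC tl) false k hk1 (by omega)
    rw [hlenrc] at this
    simpa using this
  have hmain := pvMain sl tl (pvRC tl) tl.length m1 m2 m3 m4 hat rfl h1 h2 h3 h4
    tl.length (le_refl _) hm1s.2.1 hm2s.2.1 hm3s.2.1 hm4s.2.1
  rw [hmain]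
  split_ifs <;> simp [htl]
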